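-- pv_equiv track=rewrite | github.com/pincherman/diqto-landing | generate_pages.py | get_related_metiers
-- ===== SOURCE A (Python) =====
-- def get_related_metiers(metier_id, all_metiers):
--     """Get 3-4 related métiers from the same category."""
--     current = all_metiers.get(metier_id, {})
--     category = current.get("category", "autre")
--
--     related = []
--     for mid, mdata in all_metiers.items():
--         if mid != metier_id and mdata.get("category") == category:
--             related.append(mid)
--
--     # If not enough in same category, add from others
--     if len(related) < 3:
--         for mid, mdata in all_metiers.items():
--             if mid != metier_id and mid not in related:
--                 related.append(mid)
--             if len(related) >= 4:
--                 break
--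
--     return related[:4]
-- ===== SOURCE B (Python) =====
-- def get_related_metiers(metier_id, all_metiers):
--     """Get 3-4 related métiers from the same category (single-pass partition)."""
--     current = all_metiers.get(metier_id, {})
--     category = current.get("category", "autre")
--
--     same, others = [], []
--     for mid, mdata in all_metiers.items():
--         if mid == metier_id:
--             continue
--         (same if mdata.get("category") == category else others).append(mid)
--
--     result = same + others if len(same) < 3 else same
--     return result[:4]
-- ===== Notes on version B (the rewrite author's own statement) =====
-- stated objective: simpler
-- what changed: One single pass partitions the non-current ids into ordered 'same-category' and 'other' buckets, replacing A's two separate dict scans with a membership test and a break inside the second scan; the result is same+others (or just same) truncated to 4.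
import Mathlib
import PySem

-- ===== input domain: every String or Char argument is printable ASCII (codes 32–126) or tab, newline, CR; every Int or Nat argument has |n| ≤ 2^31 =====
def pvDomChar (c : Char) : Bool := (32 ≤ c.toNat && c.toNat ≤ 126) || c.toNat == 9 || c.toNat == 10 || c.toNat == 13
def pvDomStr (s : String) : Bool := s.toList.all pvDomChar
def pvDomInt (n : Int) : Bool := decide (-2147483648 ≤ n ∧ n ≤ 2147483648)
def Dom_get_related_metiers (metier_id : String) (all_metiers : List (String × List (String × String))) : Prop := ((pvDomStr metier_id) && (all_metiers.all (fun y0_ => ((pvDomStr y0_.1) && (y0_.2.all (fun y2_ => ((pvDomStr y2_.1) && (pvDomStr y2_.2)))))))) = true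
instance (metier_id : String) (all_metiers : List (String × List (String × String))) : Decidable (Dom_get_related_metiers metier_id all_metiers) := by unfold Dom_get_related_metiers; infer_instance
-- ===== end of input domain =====

-- B replaces A's two dict scans (the second with a membership test and an early break) by one
-- single-pass partition into same-category/other buckets; objective: simpler.

-- ===== PORT A =====
-- the second loop of A: append mid if not the current id and not already collected, break at length 4
def grmLoop2 (metier_id : String) : List (String × List (String × String)) → List String → List String
  | [], related => related
  | (mid, _) :: tl, related =>
    let related := if mid != metier_id && !(related.contains mid) then related ++ [mid] else related
    if 4 ≤ related.length then related else grmLoop2 metier_id tl related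

def get_related_metiers (metier_id : String) (all_metiers : List (String × List (String × String))) : List String :=
  let current := (all_metiers.lookup metier_id).getD []
  let category := (current.lookup "category").getD "autre"
  let related := all_metiers.foldl
    (fun related p =>
      if p.1 != metier_id && (p.2.lookup "category" == some category) then related ++ [p.1]
      else related) []
  let related := if related.length < 3 then grmLoop2 metier_id all_metiers related else related
  related.take 4

-- ===== PORT B =====
-- single pass: skip the current id, put each remaining id into 'same' or 'others' in order
def grmPartition (metier_id category : String) :
    List (String × List (String × String)) → List String × List String
  | [] => ([], [])
  | (mid, mdata) :: tl =>
    let rest := grmPartition metier_id category tl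
    if mid == metier_id then rest
    else if mdata.lookup "category" == some category then (mid :: rest.1, rest.2)
    else (rest.1, mid :: rest.2)

def get_related_metiers_alt (metier_id : String) (all_metiers : List (String × List (String × String))) : List String :=
  let current := (all_metiers.lookup metier_id).getD []
  let category := (current.lookup "category").getD "autre"
  let so := grmPartition metier_id category all_metiers
  let result := if so.1.length < 3 then so.1 ++ so.2 else so.1
  result.take 4

-- ===== PRECONDITION & SPEC =====
-- Pre_ excludes association lists with a duplicated key (outer métier ids or keys inside one métier's
-- dict): a Python dict cannot contain duplicate keys, so such lists represent no input A ever receives,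
-- and the first-match assoc-list reading of them is accidental.
def Pre_get_related_metiers (metier_id : String) (all_metiers : List (String × List (String × String))) : Prop :=
  (all_metiers.map Prod.fst).Nodup ∧ ∀ p ∈ all_metiers, (p.2.map Prod.fst).Nodup

instance (metier_id : String) (all_metiers : List (String × List (String × String))) : Decidable (Pre_get_related_metiers metier_id all_metiers) := by unfold Pre_get_related_metiers; infer_instance

def pvWitness_get_related_metiers : String × (List (String × List (String × String))) :=
  ("plombier", [("plombier", [("category", "batiment")]), ("macon", [("category", "batiment")]), ("boulanger", [("category", "bouche")])])

def Spec_get_related_metiers (metier_id : String) (all_metiers : List (String × List (String × String))) (out : List String) : Prop := out = get_related_metiers_alt metier_id all_metiers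
instance (metier_id : String) (all_metiers : List (String × List (String × String))) (out : List String) : Decidable (Spec_get_related_metiers metier_id all_metiers out) := by unfold Spec_get_related_metiers; infer_instance

-- ===== CLAIM (what is proved, stated in full; the proofs are below) =====
def Claim_equal_get_related_metiers : Prop := ∀ (metier_id : String) (all_metiers : List (String × List (String × String))), Dom_get_related_metiers metier_id all_metiers → Pre_get_related_metiers metier_id all_metiers → Spec_get_related_metiers metier_id all_metiers (get_related_metiers metier_id all_metiers)

-- ===== LEMMAS AND PROOFS =====

-- the two buckets, described by filters
def grmSame (metier_id category : String) (l : List (String × List (String × String))) : List String :=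
  (l.filter (fun p => p.1 != metier_id && (p.2.lookup "category" == some category))).map Prod.fst

def grmOthers (metier_id category : String) (l : List (String × List (String × String))) : List String :=
  (l.filter (fun p => p.1 != metier_id && !(p.2.lookup "category" == some category))).map Prod.fst

theorem grmPartition_eq (metier_id category : String) (l : List (String × List (String × String))) :
    grmPartition metier_id category l = (grmSame metier_id category l, grmOthers metier_id category l) := by
  induction l with
  | nil => rfl
  | cons hd tl ih =>
    obtain ⟨mid, mdata⟩ := hd
    simp only [grmPartition, ih, grmSame, grmOthers, List.filter_cons]
    by_cases h1 : mid = metier_id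
    · simp [h1]
    · by_cases h2 : mdata.lookup "category" = some category <;> simp [h1, h2]

theorem grmFoldl_eq (metier_id category : String) (l : List (String × List (String × String)))
    (acc : List String) :
    l.foldl (fun related p =>
      if p.1 != metier_id && (p.2.lookup "category" == some category) then related ++ [p.1]
      else related) acc = acc ++ grmSame metier_id category l := by
  induction l generalizing acc with
  | nil => simp [grmSame]
  | cons hd tl ih =>
    rw [List.foldl_cons]
    by_cases h : (hd.1 != metier_id && (hd.2.lookup "category" == some category)) = true
    · rw [if_pos h, ih]
      simp only [grmSame, List.filter_cons, h, if_true, List.map_cons]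
      simp
    · rw [if_neg h, ih]
      simp only [grmSame, List.filter_cons]
      rw [if_neg h]

theorem take_append_of_four_le {xs ys : List String} (h : 4 ≤ xs.length) :
    (xs ++ ys).take 4 = xs.take 4 := by
  rw [List.take_append_of_le_length (by omega)]

theorem grmLoop2_take (metier_id category : String)
    (tl : List (String × List (String × String))) (rel : List String)
    (hnd : (tl.map Prod.fst).Nodup)
    (hinv : ∀ p ∈ tl, p.1 ∈ rel ↔ (p.1 ≠ metier_id ∧ p.2.lookup "category" = some category)) :
    (grmLoop2 metier_id tl rel).take 4 = (rel ++ grmOthers metier_id category tl).take 4 := by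
  induction tl generalizing rel with
  | nil => simp [grmLoop2, grmOthers]
  | cons hd tl ih =>
    obtain ⟨mid, mdata⟩ := hd
    simp only [List.map_cons, List.nodup_cons] at hnd
    have hmidtl : ∀ p ∈ tl, p.1 ≠ mid := by
      intro p hp heq
      exact hnd.1 (heq ▸ List.mem_map_of_mem hp)
    have hhd := hinv (mid, mdata) (List.mem_cons_self ..)
    have hinv' : ∀ p ∈ tl, p.1 ∈ rel ↔ (p.1 ≠ metier_id ∧ p.2.lookup "category" = some category) :=
      fun p hp => hinv p (List.mem_cons_of_mem _ hp)
    by_cases h1 : mid = metier_id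
    · have hc : (mid != metier_id && !(rel.contains mid)) = false := by simp [h1]
      have hfilter : ((mid, mdata).1 != metier_id && !((mid, mdata).2.lookup "category" == some category)) = false := by
        simp [h1]
      simp only [grmLoop2, grmOthers, List.filter_cons, hc, hfilter, Bool.false_eq_true, if_false]
      by_cases hlen : 4 ≤ rel.length
      · rw [if_pos hlen, take_append_of_four_le hlen]
      · rw [if_neg hlen]
        exact ih rel hnd.2 hinv'
    · by_cases h2 : mdata.lookup "category" = some category
      · -- already collected in the first loop: not appended
        have hmem : mid ∈ rel := hhd.mpr ⟨h1, h2⟩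
        have hc : (mid != metier_id && !(rel.contains mid)) = false := by simp [hmem]
        have hfilter : ((mid, mdata).1 != metier_id && !((mid, mdata).2.lookup "category" == some category)) = false := by
          simp [h2]
        simp only [grmLoop2, grmOthers, List.filter_cons, hc, hfilter, Bool.false_eq_true, if_false]
        by_cases hlen : 4 ≤ rel.length
        · rw [if_pos hlen, take_append_of_four_le hlen]
        · rw [if_neg hlen]
          exact ih rel hnd.2 hinv'
      · -- goes to others: appended
        have hnmem : mid ∉ rel := fun hm => h2 (hhd.mp hm).2
        have hc : (mid != metier_id && !(rel.contains mid)) = true := by simp [h1, hnmem]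
        have hfilter : ((mid, mdata).1 != metier_id && !((mid, mdata).2.lookup "category" == some category)) = true := by
          simp [h1, h2]
        simp only [grmLoop2, grmOthers, List.filter_cons, hc, hfilter, if_true, List.map_cons]
        have hinv'' : ∀ p ∈ tl, p.1 ∈ rel ++ [mid] ↔ (p.1 ≠ metier_id ∧ p.2.lookup "category" = some category) := by
          intro p hp
          rw [List.mem_append, List.mem_singleton]
          have hne := hmidtl p hp
          constructor
          · rintro (h | h)
            · exact (hinv' p hp).mp h
            · exact absurd h hne
          · intro h
            exact Or.inl ((hinv' p hp).mpr h)
        by_cases hlen : 4 ≤ (rel ++ [mid]).length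
        · rw [if_pos hlen]
          conv_rhs => rw [← List.singleton_append, ← List.append_assoc]
          rw [take_append_of_four_le hlen]
        · rw [if_neg hlen, ih (rel ++ [mid]) hnd.2 hinv'']
          simp [grmOthers]

theorem grmSame_mem (metier_id category : String) (l : List (String × List (String × String)))
    (hnd : (l.map Prod.fst).Nodup) :
    ∀ p ∈ l, p.1 ∈ grmSame metier_id category l ↔
      (p.1 ≠ metier_id ∧ p.2.lookup "category" = some category) := by
  intro p hp
  have hinj := List.inj_on_of_nodup_map hnd
  constructor
  · intro hmem
    simp only [grmSame, List.mem_map, List.mem_filter] at hmem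
    obtain ⟨q, ⟨hq, hcond⟩, hfst⟩ := hmem
    have : q = p := hinj hq hp hfst
    subst this
    simp only [Bool.and_eq_true, bne_iff_ne, beq_iff_eq] at hcond
    exact hcond
  · intro ⟨h1, h2⟩
    simp only [grmSame, List.mem_map, List.mem_filter]
    exact ⟨p, ⟨hp, by simp [h1, h2]⟩, rfl⟩

-- ===== VERDICT (by name: the statement is the Claim_ definition above) =====
theorem get_related_metiers_spec : Claim_equal_get_related_metiers := by
  intro metier_id all_metiers _ hpre
  unfold Spec_get_related_metiers get_related_metiers get_related_metiers_alt
  simp only [grmPartition_eq, grmFoldl_eq, List.nil_append]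
  set category := (((all_metiers.lookup metier_id).getD []).lookup "category").getD "autre" with hcat
  by_cases hlen : (grmSame metier_id category all_metiers).length < 3
  · rw [if_pos hlen, if_pos hlen]
    exact grmLoop2_take metier_id category all_metiers _ hpre.1
      (grmSame_mem metier_id category all_metiers hpre.1)
  · rw [if_neg hlen, if_neg hlen]
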